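-- pv_equiv track=rewrite | github.com/iuricardoso/iuricardoso.github.io | apoio/ia_simbolica/pacmanSearch.py | statelist_to_string
-- ===== SOURCE A (Python) =====
-- def statelist_to_string(states, cols=80):
--     n_states = len(states)
--     n_lines = len(states[0])
--     n_cols = len(states[0][0]) + 1
--     statesInLine = cols // n_cols
--
--     output = "_" * n_cols * statesInLine + "\n"
--     for iS in range(0, n_states, statesInLine):
--         for iI in range(n_lines):
--             for iS2 in range(iS, min(iS+statesInLine,n_states)):
--                 output += states[iS2][iI] + "|"
--             output += "\n"
--         output += "_" * n_cols * statesInLine + "\n"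
--     return output
-- ===== SOURCE B (Python) =====
-- def statelist_to_string(states, cols=80):
--     n_lines = len(states[0])
--     n_cols = len(states[0][0]) + 1
--     per = cols // n_cols
--     sep = "_" * (n_cols * per)
--     parts = [sep]
--     buf = [""] * n_lines
--     filled = 0
--     for st in states:
--         buf = [buf[k] + st[k] + "|" for k in range(n_lines)]
--         filled += 1
--         if filled == per:
--             parts += buf + [sep]
--             buf = [""] * n_lines
--             filled = 0
--     if filled != 0:
--         parts += buf + [sep]
--     return "\n".join(parts) + "\n"
-- ===== Notes on version B (the rewrite author's own statement) =====
-- stated objective: alternative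
-- what changed: B replaces A's row-major triple loop over chunk-start/line/state indices by a single streaming pass over the state list: it maintains one growing row-buffer per line, zips each state into the buffers, and flushes a block (buffers plus separator) every statesInLine states, joining all collected rows once at the end; no index arithmetic, slicing or re-scanning of states.
-- outside the precondition, e.g. on statelist_to_string([['ab']], -5): A returns '\n', B returns '\nab|\n\n'
import Mathlib
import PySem

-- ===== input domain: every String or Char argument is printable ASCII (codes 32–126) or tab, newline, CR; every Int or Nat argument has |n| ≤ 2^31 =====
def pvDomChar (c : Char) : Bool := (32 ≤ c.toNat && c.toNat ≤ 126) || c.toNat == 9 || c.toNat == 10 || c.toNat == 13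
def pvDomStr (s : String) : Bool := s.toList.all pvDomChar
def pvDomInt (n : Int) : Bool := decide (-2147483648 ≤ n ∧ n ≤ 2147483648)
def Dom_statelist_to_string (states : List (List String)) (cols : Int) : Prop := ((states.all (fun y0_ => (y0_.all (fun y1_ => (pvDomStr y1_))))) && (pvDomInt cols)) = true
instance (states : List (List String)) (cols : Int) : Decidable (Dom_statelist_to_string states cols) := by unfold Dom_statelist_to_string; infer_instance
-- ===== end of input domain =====

-- B formats the same grid by a single streaming pass over the states with per-line row buffers
-- flushed every statesInLine states, instead of A's index-driven triple loop; return values agree on Pre_.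

-- ===== PORT A =====
-- A, transliterated: string concatenation in a triple nested loop over indices.
def statelist_to_string (states : List (List String)) (cols : Int) : String :=
  let n_states : Int := states.length
  let n_lines : Int := (PySem.List.pyGetD states 0 []).length            -- len(states[0]); Pre_ excludes states = []
  let n_cols : Int := ((PySem.List.pyGetD (PySem.List.pyGetD states 0 []) 0 "").toList.length : Int) + 1
  let statesInLine : Int := PySem.Int.floordiv cols n_cols
  let sep : List Char := PySem.List.pyRepeat (PySem.List.pyRepeat ['_'] n_cols) statesInLine  -- "_" * n_cols * statesInLine
  let output : List Char := sep ++ ['\n']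
  let output :=
    (PySem.List.pyRange 0 n_states statesInLine).foldl (fun output iS =>
      ((PySem.List.pyRange 0 n_lines 1).foldl (fun output iI =>
        ((PySem.List.pyRange iS (min (iS + statesInLine) n_states) 1).foldl (fun output iS2 =>
          output ++ (PySem.List.pyGetD (PySem.List.pyGetD states iS2 []) iI "").toList ++ ['|']) output)
        ++ ['\n']) output)
      ++ sep ++ ['\n']) output
  String.ofList output

-- ===== PORT B =====
-- buf = [buf[k] + st[k] + "|" for k in range(n_lines)]
def pvZrow (nl : Nat) (buf : List (List Char)) (st : List String) : List (List Char) :=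
  (List.range nl).map (fun k => buf.getD k [] ++ (PySem.List.pyGetD st (k : Int) "").toList ++ ['|'])

-- the body of B's single loop over the states (state: parts, buf, filled)
def pvStep (per : Int) (nl : Nat) (sep : List Char)
    (acc : List (List Char) × List (List Char) × Int) (st : List String) :
    List (List Char) × List (List Char) × Int :=
  let buf := pvZrow nl acc.2.1 st
  let filled := acc.2.2 + 1
  if filled = per then (acc.1 ++ buf ++ [sep], List.replicate nl [], 0)
  else (acc.1, buf, filled)

-- B, transliterated: one pass over states with row buffers, flush every `per` states, join at the end.
def statelist_to_string_alt (states : List (List String)) (cols : Int) : String :=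
  let n_lines : Nat := (PySem.List.pyGetD states 0 []).length
  let n_cols : Int := ((PySem.List.pyGetD (PySem.List.pyGetD states 0 []) 0 "").toList.length : Int) + 1
  let per : Int := PySem.Int.floordiv cols n_cols
  let sep : List Char := PySem.List.pyRepeat ['_'] (n_cols * per)          -- "_" * (n_cols * per)
  let res := states.foldl (pvStep per n_lines sep) ([sep], List.replicate n_lines [], 0)
  let parts := if res.2.2 ≠ 0 then res.1 ++ res.2.1 ++ [sep] else res.1
  String.ofList (PySem.Chars.join ['\n'] parts ++ ['\n'])                  -- "\n".join(parts) + "\n"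

-- ===== PRECONDITION & SPEC =====
-- Pre_ is where A returns AND the input is in the task's natural domain: a nonempty state list whose
-- first state is nonempty (else len(states[0][0]) raises IndexError), at least one state per output
-- row, i.e. statesInLine ≥ 1 (at statesInLine = 0 A's range(…, 0) raises ValueError; negative cols,
-- where A returns a bare "\n" from an empty range and "_"*negative, are outside the natural domain
-- and excluded — see cites), and every state at least as long as states[0] (else A raises IndexError).
def Pre_statelist_to_string (states : List (List String)) (cols : Int) : Prop :=
  states ≠ [] ∧ states.headI ≠ [] ∧
  1 ≤ PySem.Int.floordiv cols ((states.headI.headI.toList.length : Int) + 1) ∧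
  ∀ s ∈ states, states.headI.length ≤ s.length
instance (states : List (List String)) (cols : Int) : Decidable (Pre_statelist_to_string states cols) := by
  unfold Pre_statelist_to_string; infer_instance

def pvWitness_statelist_to_string : List (List String) × Int := ([["ab", "cd"], ["ef", "gh"], ["ij", "kl"]], 7)

def Spec_statelist_to_string (states : List (List String)) (cols : Int) (out : String) : Prop := out = statelist_to_string_alt states cols
instance (states : List (List String)) (cols : Int) (out : String) : Decidable (Spec_statelist_to_string states cols out) := by unfold Spec_statelist_to_string; infer_instance

-- ===== CLAIM =====
def Claim_equal_statelist_to_string : Prop := ∀ (states : List (List String)) (cols : Int), Dom_statelist_to_string states cols → Pre_statelist_to_string states cols → Spec_statelist_to_string states cols (statelist_to_string states cols)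

-- ===== LEMMAS AND PROOFS =====

-- range with a positive step, peeled one element
theorem pvRange_cons (a b s : Int) (hs : 0 < s) (hab : a < b) :
    PySem.List.pyRange a b s = a :: PySem.List.pyRange (a + s) b s := by
  have hdiv : (b - a + s - 1) / s = (b - a - 1) / s + 1 := by
    have h := Int.add_mul_ediv_right (b - a - 1) 1 (by omega : s ≠ 0)
    rw [one_mul] at h
    rw [show b - a + s - 1 = b - a - 1 + s by ring, h]
  have hq0 : 0 ≤ (b - a - 1) / s := Int.ediv_nonneg (by omega) (by omega)
  rw [PySem.List.pyRange_of_pos a b hs, PySem.List.pyRange_of_pos (a + s) b hs, if_pos hab, hdiv]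
  rw [show ((b - a - 1) / s + 1).toNat = ((b - a - 1) / s).toNat + 1 by omega,
      List.range_succ_eq_map, List.map_cons, List.map_map]
  simp only [Nat.cast_zero, mul_zero, add_zero]
  congr 1
  by_cases hc : a + s < b
  · rw [if_pos hc, show b - (a + s) + s - 1 = b - a - 1 by ring]
    refine List.map_congr_left (fun k _ => ?_)
    simp only [Function.comp_apply, Nat.succ_eq_add_one]
    push_cast
    ring
  · rw [if_neg hc, Int.ediv_eq_zero_of_lt (by omega) (by omega)]
    simp

theorem pvRange_nil (a b s : Int) (hs : 0 < s) (hab : b ≤ a) :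
    PySem.List.pyRange a b s = [] := by
  rw [PySem.List.pyRange_of_pos a b hs, if_neg (by omega)]
  simp

-- A's innermost loop: append cell ++ '|' per visited state
theorem pvFoldCell (g : Int → List Char) (l : List Int) (init : List Char) :
    l.foldl (fun out j => out ++ g j ++ ['|']) init
      = init ++ l.flatMap (fun j => g j ++ ['|']) := by
  simp only [List.append_assoc]
  exact PySem.List.foldl_append_eq_flatMap _ l init

-- A's middle loop: one text row per line index
theorem pvFoldRows (cell : Int → Int → List Char) (colsOf : Int → List Int)
    (rows : List Int) (init : List Char) :
    rows.foldl (fun out iI =>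
        ((colsOf iI).foldl (fun out j => out ++ cell j iI ++ ['|']) out) ++ ['\n']) init
      = init ++ rows.flatMap (fun iI =>
          (colsOf iI).flatMap (fun j => cell j iI ++ ['|']) ++ ['\n']) := by
  rw [PySem.List.foldl_congr_mem rows _
      (fun out iI => out ++ ((colsOf iI).flatMap (fun j => cell j iI ++ ['|']) ++ ['\n'])) init
      (by intro acc x hx; rw [pvFoldCell]; simp [List.append_assoc])]
  exact PySem.List.foldl_append_eq_flatMap _ rows init

-- A's whole loop nest, flattened to one flatMap over the chunk starts
theorem pvA_flat (states : List (List String)) (nl k : Int) (sep : List Char) :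
    (PySem.List.pyRange 0 (states.length : Int) k).foldl (fun output iS =>
        ((PySem.List.pyRange 0 nl).foldl (fun output iI =>
          ((PySem.List.pyRange iS (min (iS + k) (states.length : Int))).foldl (fun output iS2 =>
            output ++ (PySem.List.pyGetD (PySem.List.pyGetD states iS2 []) iI "").toList ++ ['|']) output)
          ++ ['\n']) output)
        ++ sep ++ ['\n']) (sep ++ ['\n'])
      = (sep ++ ['\n']) ++ (PySem.List.pyRange 0 (states.length : Int) k).flatMap (fun iS =>
          (PySem.List.pyRange 0 nl).flatMap (fun iI =>
            (PySem.List.pyRange iS (min (iS + k) (states.length : Int))).flatMap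
              (fun j => (PySem.List.pyGetD (PySem.List.pyGetD states j []) iI "").toList ++ ['|'])
            ++ ['\n'])
          ++ (sep ++ ['\n'])) := by
  rw [PySem.List.foldl_congr_mem _ _
      (fun out iS => out ++ ((PySem.List.pyRange 0 nl).flatMap (fun iI =>
        (PySem.List.pyRange iS (min (iS + k) (states.length : Int))).flatMap
          (fun j => (PySem.List.pyGetD (PySem.List.pyGetD states j []) iI "").toList ++ ['|'])
        ++ ['\n']) ++ (sep ++ ['\n']))) _
      (by intro acc x hx; rw [pvFoldRows]; simp [List.append_assoc])]
  exact PySem.List.foldl_append_eq_flatMap _ _ _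

-- '\n'.join(parts) + '\n' written cell-wise
theorem pvJoinNL (cs : List (List Char)) (h : cs ≠ []) :
    PySem.Chars.join ['\n'] cs ++ ['\n'] = cs.flatMap (fun c => c ++ ['\n']) := by
  induction cs with
  | nil => cases h rfl
  | cons a t ih =>
    cases t with
    | nil => simp [PySem.Chars.join_singleton]
    | cons b r =>
      rw [PySem.Chars.join_cons_cons]
      simp only [List.flatMap_cons] at ih ⊢
      rw [← ih (by simp)]
      simp [List.append_assoc]

-- the block decomposition B's streaming loop computes (proved in pvFoldB below)
def pvBlocks (per : Nat) (nl : Nat) (sep : List Char) : List (List String) → List (List Char)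
  | [] => []
  | l@(_ :: t) =>
    (List.foldl (pvZrow nl) (List.replicate nl []) (l.take per) ++ [sep]) ++ pvBlocks per nl sep (t.drop (per - 1))
termination_by l => l.length
decreasing_by simp only [List.length_cons]; simp [List.length_drop]

-- pvBlocks unfolded on a nonempty list
theorem pvBlocks_cons (per nl : Nat) (sep : List Char) (h : List String) (t : List (List String)) :
    pvBlocks per nl sep (h :: t)
      = (List.foldl (pvZrow nl) (List.replicate nl []) ((h :: t).take per) ++ [sep])
        ++ pvBlocks per nl sep (t.drop (per - 1)) := by
  rw [pvBlocks.eq_def]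

-- a partial chunk never flushes
theorem pvFoldPartial (per : Int) (nl : Nat) (sep : List Char) (c : List (List String))
    (parts buf : List (List Char)) (f : Int) (hf : 0 ≤ f) (hlt : f + c.length < per) :
    c.foldl (pvStep per nl sep) (parts, buf, f)
      = (parts, c.foldl (pvZrow nl) buf, f + c.length) := by
  induction c generalizing buf f with
  | nil => simp
  | cons st c ih =>
    have hne : f + 1 ≠ per := by
      simp only [List.length_cons] at hlt
      push_cast at hlt
      omega
    simp only [List.foldl_cons, pvStep, if_neg hne]
    rw [ih (pvZrow nl buf st) (f + 1) (by omega)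
        (by simp only [List.length_cons] at hlt; push_cast at hlt ⊢; omega)]
    simp only [List.length_cons]
    push_cast
    ring_nf

-- a full chunk flushes exactly at its last state
theorem pvFoldFull (per : Int) (nl : Nat) (sep : List Char) (c : List (List String))
    (parts buf : List (List Char)) (hper : 0 < per) (hc : (c.length : Int) = per) :
    c.foldl (pvStep per nl sep) (parts, buf, 0)
      = (parts ++ c.foldl (pvZrow nl) buf ++ [sep], List.replicate nl [], 0) := by
  rcases List.eq_nil_or_concat' c with rfl | ⟨c', last, rfl⟩
  · simp at hc; omega
  · have hlen' : (c'.length : Int) = per - 1 := by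
      simp only [List.length_append, List.length_cons, List.length_nil] at hc
      push_cast at hc ⊢
      omega
    rw [List.foldl_append, pvFoldPartial per nl sep c' parts buf 0 le_rfl (by omega)]
    simp only [List.foldl_cons, List.foldl_nil, pvStep, zero_add, hlen']
    rw [List.foldl_append]
    simp

-- B's whole loop plus the final flush equals the block decomposition
theorem pvFoldB (per : Int) (nl : Nat) (sep : List Char) (states : List (List String))
    (parts : List (List Char)) (hper : 0 < per) :
    (let res := states.foldl (pvStep per nl sep) (parts, List.replicate nl [], 0)
     if res.2.2 ≠ 0 then res.1 ++ res.2.1 ++ [sep] else res.1)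
      = parts ++ pvBlocks per.toNat nl sep states := by
  induction hm : states.length using Nat.strong_induction_on generalizing states parts with
  | _ m ih =>
  subst hm
  cases states with
  | nil => simp [pvBlocks]
  | cons h t =>
    by_cases hsmall : ((h :: t).length : Int) < per
    · rw [show ((h :: t).foldl (pvStep per nl sep) (parts, List.replicate nl [], 0))
            = (parts, (h :: t).foldl (pvZrow nl) (List.replicate nl []), (0 : Int) + ((h :: t).length : Int)) from
          pvFoldPartial per nl sep (h :: t) parts _ 0 le_rfl (by omega)]
      simp only [zero_add]
      rw [if_pos (show ((h :: t).length : Int) ≠ 0 by simp only [List.length_cons]; omega)]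
      rw [pvBlocks_cons]
      rw [List.take_of_length_le (by simp only [List.length_cons] at hsmall ⊢; push_cast at hsmall; omega),
          List.drop_eq_nil_of_le (by simp only [List.length_cons] at hsmall; push_cast at hsmall; omega)]
      simp [pvBlocks, List.append_assoc]
    · have hge : per ≤ ((h :: t).length : Int) := le_of_not_gt hsmall
      have hsplit : h :: t = (h :: t).take per.toNat ++ (h :: t).drop per.toNat :=
        (List.take_append_drop _ _).symm
      rw [hsplit, List.foldl_append,
          pvFoldFull per nl sep _ parts _ hper
            (by rw [List.length_take]; push_cast; omega)]
      have hlt : ((h :: t).drop per.toNat).length < (h :: t).length := by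
        rw [List.length_drop]
        simp only [List.length_cons]
        omega
      rw [ih _ hlt _ _ rfl]
      rw [← hsplit, pvBlocks_cons]
      have hdrop : t.drop (per.toNat - 1) = (h :: t).drop per.toNat := by
        rw [show per.toNat = (per.toNat - 1) + 1 by omega, List.drop_succ_cons]; simp
      rw [hdrop]
      simp [List.append_assoc]

-- row buffers after a chunk, row by row
theorem pvZrowFold (nl : Nat) (c : List (List String)) (buf : List (List Char))
    (hb : buf.length = nl) :
    c.foldl (pvZrow nl) buf
      = (List.range nl).map (fun k => buf.getD k [] ++ c.flatMap (fun s => (s.getD k "").toList ++ ['|'])) := by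
  induction c generalizing buf with
  | nil =>
    refine List.ext_getElem (by simp [hb]) (fun k hk hk' => ?_)
    simp only [List.length_map, List.length_range] at hk'
    simp [List.getD_eq_getElem?_getD, List.getElem?_eq_getElem (by omega : k < buf.length)]
  | cons s c ih =>
    have hz : pvZrow nl buf s
        = (List.range nl).map (fun k => buf.getD k [] ++ (s.getD k "").toList ++ ['|']) := by
      refine List.map_congr_left (fun k _ => ?_)
      simp [List.getD_eq_getElem?_getD]
    simp only [List.foldl_cons, hz]
    rw [ih _ (by simp)]
    refine List.map_congr_left (fun k hk => ?_)
    rw [PySem.List.getD_map_range _ _ _ _ (List.mem_range.mp hk)]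
    simp [List.append_assoc]

-- the states A visits in one outer step are exactly B's current chunk
theorem pvChunk_eq (states : List (List String)) (k i : Int) (hk : 1 ≤ k)
    (hi0 : 0 ≤ i) (hin : i < (states.length : Int)) :
    (PySem.List.pyRange i (min (i + k) (states.length : Int))).map
        (fun j => PySem.List.pyGetD states j [])
      = PySem.List.slice states (some i) (some (i + k)) := by
  have hmin_le : i ≤ min (i + k) (states.length : Int) := le_min (by omega) (le_of_lt hin)
  have hfull := PySem.List.map_pyGetD_pyRange' states ([] : List String) hi0
  rw [PySem.List.pyRange_one_append i (min (i + k) (states.length : Int)) (states.length : Int)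
        hmin_le (min_le_right _ _), List.map_append] at hfull
  have hlenA : ((PySem.List.pyRange i (min (i + k) (states.length : Int))).map
      (fun j => PySem.List.pyGetD states j [])).length
      = (min (i + k) (states.length : Int) - i).toNat := by
    rw [List.length_map, PySem.List.length_pyRange_one]
  have hA : (PySem.List.pyRange i (min (i + k) (states.length : Int))).map
      (fun j => PySem.List.pyGetD states j [])
      = (states.drop i.toNat).take ((min (i + k) (states.length : Int) - i).toNat) := by
    rw [← List.take_left' hlenA
        (l₂ := (PySem.List.pyRange (min (i + k) (states.length : Int)) (states.length : Int)).map
          (fun j => PySem.List.pyGetD states j [])), hfull]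
  rw [hA, PySem.List.slice_toNat states hi0 (by omega)]
  by_cases hc : i + k ≤ (states.length : Int)
  · rw [min_eq_left hc]
    congr 1
    omega
  · rw [min_eq_right (by omega)]
    rw [List.take_of_length_le (by simp; omega), List.take_of_length_le (by simp; omega)]

-- one outer step of A equals one block of B, character for character
theorem pvBlock_eq (states : List (List String)) (nl : Nat) (per : Int) (sep : List Char)
    (hper : 0 < per)
    (i : Int) (hi0 : 0 ≤ i) (hin : i < (states.length : Int)) :
    (PySem.List.pyRange 0 (nl : Int)).flatMap (fun iI =>
        (PySem.List.pyRange i (min (i + per) (states.length : Int))).flatMap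
          (fun j => (PySem.List.pyGetD (PySem.List.pyGetD states j []) iI "").toList ++ ['|'])
        ++ ['\n'])
      ++ (sep ++ ['\n'])
      = ((List.foldl (pvZrow nl) (List.replicate nl [])
            ((states.drop i.toNat).take per.toNat) ++ [sep]).flatMap (fun c => c ++ ['\n'])) := by
  have hchunk : PySem.List.slice states (some i) (some (i + per))
      = (states.drop i.toNat).take per.toNat := by
    rw [PySem.List.slice_toNat states hi0 (by omega)]
    congr 1
    omega
  have hrows := pvZrowFold nl ((states.drop i.toNat).take per.toNat)
      (List.replicate nl []) (by simp)
  rw [List.flatMap_append, hrows]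
  simp only [List.flatMap_cons, List.flatMap_nil, List.append_nil, List.flatMap_map]
  rw [PySem.List.pyRange_zero_nat nl, List.flatMap_map]
  refine congrArg (· ++ (sep ++ ['\n'])) ?_
  refine List.flatMap_congr (fun k _ => ?_)
  have hrow : (PySem.List.pyRange i (min (i + per) (states.length : Int))).flatMap
      (fun j => (PySem.List.pyGetD (PySem.List.pyGetD states j []) (k : Int) "").toList ++ ['|'])
      = (((states.drop i.toNat).take per.toNat).map
          (fun s => (s.getD k "").toList)).flatMap (fun c => c ++ ['|']) := by
    rw [← hchunk, ← pvChunk_eq states per i (by omega) hi0 hin, List.map_map, List.flatMap_map]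
    exact List.flatMap_congr (fun j _ => by simp)
  rw [hrow, List.flatMap_map]
  simp [List.getD_eq_getElem?_getD]

-- A's chunk-start range, against B's recursive block decomposition
theorem pvOuter (states : List (List String)) (nl : Nat) (per : Int) (sep : List Char)
    (hper : 0 < per)
    (i : Int) (hi0 : 0 ≤ i) :
    (PySem.List.pyRange i (states.length : Int) per).flatMap (fun iS =>
        (PySem.List.pyRange 0 (nl : Int)).flatMap (fun iI =>
          (PySem.List.pyRange iS (min (iS + per) (states.length : Int))).flatMap
            (fun j => (PySem.List.pyGetD (PySem.List.pyGetD states j []) iI "").toList ++ ['|'])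
          ++ ['\n'])
        ++ (sep ++ ['\n']))
      = (pvBlocks per.toNat nl sep (states.drop i.toNat)).flatMap (fun c => c ++ ['\n']) := by
  induction hm : ((states.length : Int) - i).toNat using Nat.strong_induction_on generalizing i with
  | _ m ih =>
  subst hm
  by_cases hlt : i < (states.length : Int)
  · rw [pvRange_cons i _ per hper hlt, List.flatMap_cons]
    obtain ⟨h, t, hdt⟩ : ∃ h t, states.drop i.toNat = h :: t := by
      cases hd : states.drop i.toNat with
      | nil =>
        have := List.drop_eq_nil_iff.mp hd
        omega
      | cons h t => exact ⟨h, t, rfl⟩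
    have hdrop2 : t.drop (per.toNat - 1) = states.drop (i + per).toNat := by
      have h1 : (states.drop i.toNat).drop per.toNat = states.drop (i + per).toNat := by
        rw [List.drop_drop]
        congr 1
        omega
      rw [← h1, hdt, show per.toNat = (per.toNat - 1) + 1 by omega, List.drop_succ_cons]
      simp
    rw [hdt, pvBlocks_cons, ← hdt, List.flatMap_append, hdrop2]
    rw [ih ((states.length : Int) - (i + per)).toNat (by omega) (i + per) (by omega) rfl]
    rw [pvBlock_eq states nl per sep hper i hi0 hlt]
  · rw [pvRange_nil _ _ _ hper (by omega), List.drop_eq_nil_of_le (by omega)]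
    simp [pvBlocks]

-- "_"*(n*m) as flattened replicates
theorem pvFlattenRep (a b : Nat) (x : Char) :
    (List.replicate a (List.replicate b x)).flatten = List.replicate (a * b) x := by
  induction a with
  | zero => simp
  | succ a ih =>
    rw [List.replicate_succ, List.flatten_cons, ih, ← List.replicate_add]
    congr 1
    ring

-- A's "_" * n_cols * statesInLine is B's "_" * (n_cols * statesInLine)
theorem pvSepEq (m p : Int) (hm : 0 ≤ m) (hp : 0 ≤ p) :
    PySem.List.pyRepeat (PySem.List.pyRepeat ['_'] m) p = PySem.List.pyRepeat ['_'] (m * p) := by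
  rw [PySem.List.pyRepeat_singleton, PySem.List.pyRepeat_singleton]
  show (List.replicate p.toNat (List.replicate m.toNat '_')).flatten = _
  rw [pvFlattenRep, Int.toNat_mul hm hp, Nat.mul_comm]

-- ===== VERDICT (by name: the statement is the Claim_ definition above) =====
theorem statelist_to_string_spec : Claim_equal_statelist_to_string := by
  intro states cols _ hpre
  obtain ⟨h1, h2, hk, hlen⟩ := hpre
  unfold Spec_statelist_to_string
  obtain ⟨s0, rest, rfl⟩ : ∃ s0 rest, states = s0 :: rest := by
    cases states with
    | nil => cases h1 rfl
    | cons a t => exact ⟨a, t, rfl⟩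
  obtain ⟨t0, ts, rfl⟩ : ∃ t0 ts, s0 = t0 :: ts := by
    cases s0 with
    | nil => exact (h2 rfl).elim
    | cons a t => exact ⟨a, t, rfl⟩
  simp only [List.headI] at hk hlen
  simp only [statelist_to_string, statelist_to_string_alt, PySem.List.pyGetD_zero_cons]
  refine congrArg String.ofList ?_
  rw [pvSepEq ((t0.toList.length : Int) + 1) (PySem.Int.floordiv cols ((t0.toList.length : Int) + 1))
      (by omega) (by omega)]
  rw [pvA_flat ((t0 :: ts) :: rest) (((t0 :: ts).length : Int))
      (PySem.Int.floordiv cols ((t0.toList.length : Int) + 1)) _]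
  have hB := pvFoldB (PySem.Int.floordiv cols ((t0.toList.length : Int) + 1)) (t0 :: ts).length
      (PySem.List.pyRepeat ['_'] (((t0.toList.length : Int) + 1) * PySem.Int.floordiv cols ((t0.toList.length : Int) + 1)))
      ((t0 :: ts) :: rest) [PySem.List.pyRepeat ['_'] (((t0.toList.length : Int) + 1) * PySem.Int.floordiv cols ((t0.toList.length : Int) + 1))]
      (by omega)
  simp only [] at hB
  rw [hB]
  rw [pvJoinNL _ (by simp)]
  rw [pvOuter ((t0 :: ts) :: rest) (t0 :: ts).length
      (PySem.Int.floordiv cols ((t0.toList.length : Int) + 1)) _ (by omega) 0 le_rfl]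
  simp [List.append_assoc]
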